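-- pv_equiv track=rewrite | github.com/cedricwangyu/LC | 1564-Put_Boxes_Into_the_Warehouse_I.py | maxBoxesInWarehouse
-- ===== SOURCE A (Python) =====
-- from typing import List
--
-- import bisect
--
-- def maxBoxesInWarehouse(boxes: List[int], warehouse: List[int]) -> int:
--     M = warehouse[0]
--     for i in range(len(warehouse)):
--         M = min(M, warehouse[i])
--         warehouse[i] = M
--     boxes.sort()
--     res = 0
--     for i in range(len(warehouse)-1, -1, -1):
--         j = bisect.bisect_right(boxes, warehouse[i])
--         if j > 0:
--             res += 1
--             boxes.pop(j-1)
--     return res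
-- ===== SOURCE B (Python) =====
-- def maxBoxesInWarehouse(boxes, warehouse):
--     b = sorted(boxes)
--     mins = []
--     m = None
--     for h in warehouse:
--         m = h if m is None else min(m, h)
--         mins.append(m)
--     i = 0
--     for cap in reversed(mins):
--         if i < len(b) and b[i] <= cap:
--             i += 1
--     return i
-- ===== Notes on version B (the rewrite author's own statement) =====
-- stated objective: faster
-- what changed: Replaces A's per-room bisect plus O(n) list.pop of the largest fitting box with a single two-pointer sweep: sort the boxes once, build the prefix-min room heights, and walk one index over the sorted boxes while scanning the rooms deepest-first, so no element is ever removed from a list.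
import Mathlib
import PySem

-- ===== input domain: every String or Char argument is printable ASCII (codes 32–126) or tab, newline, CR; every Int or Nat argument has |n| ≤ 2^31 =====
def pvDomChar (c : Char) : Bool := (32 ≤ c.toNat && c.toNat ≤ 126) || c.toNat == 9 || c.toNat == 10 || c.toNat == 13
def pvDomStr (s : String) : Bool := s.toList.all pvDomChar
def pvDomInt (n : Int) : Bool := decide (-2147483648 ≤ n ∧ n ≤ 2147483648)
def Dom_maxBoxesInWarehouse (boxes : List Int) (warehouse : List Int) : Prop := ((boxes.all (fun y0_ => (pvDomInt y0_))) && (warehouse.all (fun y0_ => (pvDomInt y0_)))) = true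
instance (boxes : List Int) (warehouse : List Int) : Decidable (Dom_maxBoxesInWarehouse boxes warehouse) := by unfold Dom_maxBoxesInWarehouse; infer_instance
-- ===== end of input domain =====

-- B replaces A's per-room bisect + O(n) pop of the largest fitting box by a one-pass two-pointer
-- sweep over the sorted boxes (objective: faster). A mutates its arguments in place (sorts `boxes`,
-- pops from it, overwrites `warehouse`); B does not — the equivalence proved here is about the
-- RETURN value only.

-- ===== PORT A =====
-- 'for i in range(len(warehouse)): M = min(M, warehouse[i]); warehouse[i] = M' — the loop reads and
-- writes only position i, so its obvious structural recursion carries the same state (M, remaining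
-- suffix) and produces the same list of written values in the same order.
def pvPrefMinA (M : Int) : List Int → List Int
  | [] => []
  | h :: t => let M' := min M h; M' :: pvPrefMinA M' t

-- loop body of A's second loop, on the room height read from w[i]:
-- j = bisect_right(boxes, cap); if j > 0: res += 1; boxes.pop(j-1)
def pvStepA (st : List Int × Int) (cap : Int) : List Int × Int :=
  let j := PySem.List.bisectRight st.1 cap
  if 0 < j then
    match PySem.List.pop? st.1 ((j : Int) - 1) with
    | some (_, rest) => (rest, st.2 + 1)
    | none => st
  else st

def maxBoxesInWarehouse (boxes : List Int) (warehouse : List Int) : Int :=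
  -- M = warehouse[0] raises IndexError on empty warehouse: excluded by Pre_
  let M0 : Int := PySem.List.pyGetD warehouse 0 0
  let w := pvPrefMinA M0 warehouse
  let sortedBoxes := PySem.List.sorted boxes (fun x => x)  -- boxes.sort()
  -- for i in range(len(warehouse)-1, -1, -1): read w[i], then the loop body pvStepA
  let st := (PySem.List.pyRange ((w.length : Int) - 1) (-1) (-1)).foldl
    (fun (st : List Int × Int) i => pvStepA st (PySem.List.pyGetD w i 0)) (sortedBoxes, 0)
  st.2

-- ===== PORT B =====
-- 'm = h if m is None else min(m, h); mins.append(m)'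
def pvMinsB : Option Int → List Int → List Int
  | _, [] => []
  | m, h :: t =>
      let m' := match m with | none => h | some v => min v h
      m' :: pvMinsB (some m') t

def maxBoxesInWarehouse_alt (boxes : List Int) (warehouse : List Int) : Int :=
  let b := PySem.List.sorted boxes (fun x => x)
  let mins := pvMinsB none warehouse
  let i := mins.reverse.foldl
    (fun (i : Nat) cap => if i < b.length && decide (b.getD i 0 ≤ cap) then i + 1 else i) 0
  (i : Int)

-- ===== PRECONDITION & SPEC =====
-- A reads warehouse[0]: an empty warehouse raises IndexError.
def Pre_maxBoxesInWarehouse (boxes : List Int) (warehouse : List Int) : Prop := warehouse ≠ []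
instance (boxes : List Int) (warehouse : List Int) : Decidable (Pre_maxBoxesInWarehouse boxes warehouse) := by unfold Pre_maxBoxesInWarehouse; infer_instance
def pvWitness_maxBoxesInWarehouse : List Int × List Int := ([1, 4, 2], [3, 2, 5])

def Spec_maxBoxesInWarehouse (boxes : List Int) (warehouse : List Int) (out : Int) : Prop := out = maxBoxesInWarehouse_alt boxes warehouse
instance (boxes : List Int) (warehouse : List Int) (out : Int) : Decidable (Spec_maxBoxesInWarehouse boxes warehouse out) := by unfold Spec_maxBoxesInWarehouse; infer_instance

-- ===== CLAIM (what is proved, stated in full; the proofs are below) =====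
def Claim_equal_maxBoxesInWarehouse : Prop := ∀ (boxes : List Int) (warehouse : List Int), Dom_maxBoxesInWarehouse boxes warehouse → Pre_maxBoxesInWarehouse boxes warehouse → Spec_maxBoxesInWarehouse boxes warehouse (maxBoxesInWarehouse boxes warehouse)
-- ===== LEMMAS AND PROOFS =====

-- A's greedy, abstracted from the fold: for each cap (deepest room first), pop the largest
-- remaining sorted box that fits (the element at index bisectRight-1).
def fCore (S : List Int) : List Int → Int
  | [] => 0
  | c :: C =>
      let j := PySem.List.bisectRight S c
      if 0 < j then
        match PySem.List.pop? S ((j : Int) - 1) with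
        | some (_, rest) => 1 + fCore rest C
        | none => fCore S C
      else fCore S C

-- B's greedy, abstracted from the pointer fold: match the smallest remaining box if it fits.
def gCore : List Int → List Int → Nat
  | _, [] => 0
  | [], _ :: C => gCore [] C
  | h :: t, c :: C => if h ≤ c then 1 + gCore t C else gCore (h :: t) C

lemma sorted_getElem_mono {S : List Int} (hS : S.Pairwise (· ≤ ·)) {i j : Nat}
    (hij : i ≤ j) (hj : j < S.length) : S[i]'(lt_of_le_of_lt hij hj) ≤ S[j] := by
  rcases Nat.lt_or_eq_of_le hij with h | h
  · exact (List.pairwise_iff_getElem.mp hS) i j _ hj h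
  · subst h; exact le_refl _

-- removing ANY element ≤ c₀ from a sorted list gives the same greedy count as removing the
-- smallest one, as long as every later cap is ≥ c₀
lemma gCore_eraseIdx (c₀ : Int) : ∀ (S : List Int) (k : Nat) (C : List Int),
    S.Pairwise (· ≤ ·) → (hk : k < S.length) → S[k] ≤ c₀ → (∀ c ∈ C, c₀ ≤ c) →
    gCore (S.eraseIdx k) C = gCore S.tail C := by
  intro S
  induction S with
  | nil => intro k C _ hk; simp at hk
  | cons h t ih =>
      intro k C hS hk hkc hC
      cases k with
      | zero => simp [List.eraseIdx]
      | succ k =>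
          have hkt : k < t.length := by simpa using hk
          have htk : t[k] ≤ c₀ := by simpa using hkc
          have hpt : t.Pairwise (· ≤ ·) := hS.of_cons
          cases C with
          | nil => rfl
          | cons c C' =>
              have hc : c₀ ≤ c := hC c (by simp)
              have hh : h ≤ c := le_trans (le_trans (List.rel_of_pairwise_cons hS (List.getElem_mem hkt)) htk) hc
              obtain ⟨h2, t2, rfl⟩ : ∃ h2 t2, t = h2 :: t2 := by
                cases t with
                | nil => simp at hkt
                | cons a b => exact ⟨a, b, rfl⟩
              have hh2 : h2 ≤ c := by
                have : (h2 :: t2)[0]'(by simp) ≤ (h2 :: t2)[k] := sorted_getElem_mono hpt (Nat.zero_le k) hkt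
                simpa using le_trans (le_trans this htk) hc
              have := ih k C' hpt hkt htk (fun c' hc' => hC c' (by simp [hc']))
              simp only [List.eraseIdx_cons_succ, List.tail_cons] at this ⊢
              simp [gCore, hh, hh2, this]

lemma fCore_eq_gCore : ∀ (C S : List Int), S.Pairwise (· ≤ ·) → C.Pairwise (· ≤ ·) →
    fCore S C = (gCore S C : Int) := by
  intro C
  induction C with
  | nil => intro S _ _; rfl
  | cons c C' ih =>
      intro S hS hC
      have hC' : C'.Pairwise (· ≤ ·) := hC.of_cons
      obtain ⟨hjle, hjlt, hjge⟩ := PySem.List.bisectRight_spec S c hS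
      set j := PySem.List.bisectRight S c with hj
      cases S with
      | nil =>
          have hj0 : j = 0 := Nat.le_zero.mp hjle
          simp [fCore, gCore, ih [] (by simp) hC']
      | cons h t =>
          by_cases hhc : h ≤ c
          · have hj0 : 0 < j := by
              by_contra hcon
              have : c < (h :: t)[0] := hjge 0 (by simp) (by omega)
              simp at this; omega
            have hjm1 : j - 1 < (h :: t).length := by omega
            have hcast : ((j : Int) - 1) = ((j - 1 : Nat) : Int) := by omega
            have hpop := PySem.List.pop?_natCast (h :: t) (j - 1) hjm1
            have hle : (h :: t)[j-1] ≤ c := hjlt (j - 1) hjm1 (by omega)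
            have hsub : ((h :: t).eraseIdx (j - 1)).Pairwise (· ≤ ·) :=
              hS.sublist (List.eraseIdx_sublist _ _)
            have h1 : fCore ((h :: t).eraseIdx (j - 1)) C' = (gCore ((h :: t).eraseIdx (j - 1)) C' : Int) :=
              ih _ hsub hC'
            have h2 : gCore ((h :: t).eraseIdx (j - 1)) C' = gCore t C' :=
              gCore_eraseIdx c (h :: t) (j - 1) C' hS hjm1 hle
                (fun c' hc' => List.rel_of_pairwise_cons hC hc')
            simp only [fCore, ← hj, if_pos hj0, hcast, hpop]
            simp [gCore, hhc, h1, h2]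
          · have hj0 : j = 0 := by
              by_contra hcon
              have : (h :: t)[0]'(by simp) ≤ c := hjlt 0 (by simp) (by omega)
              simp at this; omega
            simp only [fCore, ← hj, hj0, gCore, if_neg hhc, if_neg (by omega : ¬ 0 < (0:Nat))]
            exact ih (h :: t) hS hC'

-- pvMinsB with a 'some' accumulator is pvPrefMinA
lemma pvMinsB_some (l : List Int) : ∀ m, pvMinsB (some m) l = pvPrefMinA m l := by
  induction l with
  | nil => intro m; rfl
  | cons h t ih => intro m; simp [pvMinsB, pvPrefMinA, ih]

lemma pvMinsB_none (h : Int) (t : List Int) :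
    pvMinsB none (h :: t) = pvPrefMinA h (h :: t) := by
  simp [pvMinsB, pvPrefMinA, pvMinsB_some]

lemma pvPrefMinA_le (M : Int) : ∀ l, ∀ x ∈ pvPrefMinA M l, x ≤ M := by
  intro l
  induction l generalizing M with
  | nil => simp [pvPrefMinA]
  | cons h t ih =>
      intro x hx
      simp only [pvPrefMinA, List.mem_cons] at hx
      rcases hx with rfl | hx
      · exact min_le_left _ _
      · exact le_trans (ih (min M h) x hx) (min_le_left _ _)

lemma pvPrefMinA_antitone (M : Int) : ∀ l, (pvPrefMinA M l).Pairwise (fun a b => b ≤ a) := by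
  intro l
  induction l generalizing M with
  | nil => simp [pvPrefMinA]
  | cons h t ih =>
      simp only [pvPrefMinA, List.pairwise_cons]
      exact ⟨pvPrefMinA_le (min M h) t, ih (min M h)⟩

-- A's fold accumulates fCore
lemma foldA_eq_fCore (C : List Int) : ∀ (S : List Int) (r : Int),
    (C.foldl pvStepA (S, r)).2 = r + fCore S C := by
  induction C with
  | nil => intro S r; simp [fCore]
  | cons c C' ih =>
      intro S r
      simp only [List.foldl_cons, fCore, pvStepA]
      by_cases hj : 0 < PySem.List.bisectRight S c
      · simp only [if_pos hj]
        cases hpop : PySem.List.pop? S ((PySem.List.bisectRight S c : Int) - 1) with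
        | none => rw [ih]; try ring
        | some p => rcases p with ⟨v, rest⟩; rw [ih]; try ring
      · simp only [if_neg hj]; rw [ih]; try ring

-- B's fold is a pointer form of gCore
lemma foldB_eq_gCore (b : List Int) : ∀ (C : List Int) (i : Nat), i ≤ b.length →
    C.foldl (fun (i : Nat) cap => if i < b.length && decide (b.getD i 0 ≤ cap) then i + 1 else i) i
      = i + gCore (b.drop i) C := by
  intro C
  induction C with
  | nil => intro i _; simp [gCore]
  | cons c C' ih =>
      intro i hi
      simp only [List.foldl_cons]
      rcases Nat.lt_or_eq_of_le hi with hlt | heq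
      · have hdrop : b.drop i = b[i] :: b.drop (i + 1) := List.drop_eq_getElem_cons hlt
        have hgetD : b.getD i 0 = b[i] := List.getD_eq_getElem b 0 hlt
        by_cases hbc : b[i] ≤ c
        · rw [if_pos (by simp [hlt, hbc]), ih (i + 1) hlt, hdrop]
          simp [gCore, hbc]; omega
        · rw [if_neg (by simp only [Bool.and_eq_true, decide_eq_true_eq, not_and]; exact fun _ => by rw [hgetD]; exact hbc), ih i hi, hdrop]
          simp [gCore, hbc]
      · have hdrop : b.drop i = [] := by rw [heq]; simp
        rw [if_neg (by simp [heq]), ih i hi, hdrop]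
        simp [gCore]

-- ===== VERDICT (by name: the statement is the Claim_ definition above) =====
theorem maxBoxesInWarehouse_spec : Claim_equal_maxBoxesInWarehouse := by
  intro boxes warehouse _ hpre
  unfold Spec_maxBoxesInWarehouse
  obtain ⟨w0, rest, rfl⟩ : ∃ w0 rest, warehouse = w0 :: rest := by
    cases warehouse with
    | nil => exact absurd rfl hpre
    | cons a b => exact ⟨a, b, rfl⟩
  have hM0 : PySem.List.pyGetD (w0 :: rest) (0 : Int) 0 = w0 := by
    simp [PySem.List.pyGetD_zero]
  simp only [maxBoxesInWarehouse, maxBoxesInWarehouse_alt, hM0, pvMinsB_none]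
  set P := pvPrefMinA w0 (w0 :: rest) with hP
  set b := PySem.List.sorted boxes (fun x => x) with hb
  -- turn A's downward index loop into a fold over P.reverse
  have hrange : PySem.List.pyRange ((P.length : Int) - 1) (-1) (-1)
      = (PySem.List.pyRange 0 (P.length : Int) 1).reverse := by
    rw [PySem.List.pyRange_neg_one_eq_reverse]
    norm_num
  have hcaps : (PySem.List.pyRange 0 (P.length : Int) 1).map (fun i => PySem.List.pyGetD P i 0) = P :=
    PySem.List.map_pyGetD_pyRange_zero' P 0
  have hAidx : ∀ (init : List Int × Int),
      (PySem.List.pyRange ((P.length : Int) - 1) (-1) (-1)).foldl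
        (fun (st : List Int × Int) i => pvStepA st (PySem.List.pyGetD P i 0)) init
      = P.reverse.foldl pvStepA init := by
    intro init
    rw [hrange]
    have h1 : ((PySem.List.pyRange 0 (P.length : Int) 1).reverse).foldl
        (fun (st : List Int × Int) i => pvStepA st (PySem.List.pyGetD P i 0)) init
        = (((PySem.List.pyRange 0 (P.length : Int) 1).reverse).map
            (fun i => PySem.List.pyGetD P i 0)).foldl pvStepA init :=
      List.foldl_map.symm
    rw [h1, List.map_reverse, hcaps]
  rw [hAidx, foldA_eq_fCore, foldB_eq_gCore b P.reverse 0 (Nat.zero_le _)]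
  simp only [List.drop_zero, zero_add]
  have hSsorted : b.Pairwise (· ≤ ·) := PySem.List.sorted_pairwise boxes (fun x => x)
  have hCsorted : P.reverse.Pairwise (· ≤ ·) := by
    rw [List.pairwise_reverse]
    exact pvPrefMinA_antitone w0 (w0 :: rest)
  exact fCore_eq_gCore P.reverse b hSsorted hCsorted
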